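-- pv_equiv track=rewrite | github.com/hyeonzi423/Algorithm | 프로그래머스/unrated/140108. 문자열 나누기/문자열 나누기.py | solution
-- ===== SOURCE A (Python) =====
-- def solution(s):
--     s = [i for i in s]
--     tmp1 = s.pop(0)
--     answer, a, b = 0, 1, 0
--     while s:
--         if a != b:
--             tmp2 = s.pop(0)
--             if tmp1 == tmp2:
--                 a += 1
--             else:
--                 b += 1
--         else:
--             tmp1 = s.pop(0)
--             a, b = 1, 0
--             answer += 1
--     return answer + 1
-- ===== SOURCE B (Python) =====
-- def solution(s):
--     answer = 0
--     same = diff = 0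
--     cur = None
--     for ch in s:
--         if same == diff:
--             answer += 1
--             cur = ch
--             same, diff = 1, 0
--         elif ch == cur:
--             same += 1
--         else:
--             diff += 1
--     return answer
-- ===== Notes on version B (the rewrite author's own statement) =====
-- stated objective: faster
-- what changed: Replaced A's while-loop that repeatedly calls list.pop(0) (each O(n)) with a single for-loop over the string keeping counters and counting segment starts, so the +1-at-the-end bookkeeping also disappears.
import Mathlib
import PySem

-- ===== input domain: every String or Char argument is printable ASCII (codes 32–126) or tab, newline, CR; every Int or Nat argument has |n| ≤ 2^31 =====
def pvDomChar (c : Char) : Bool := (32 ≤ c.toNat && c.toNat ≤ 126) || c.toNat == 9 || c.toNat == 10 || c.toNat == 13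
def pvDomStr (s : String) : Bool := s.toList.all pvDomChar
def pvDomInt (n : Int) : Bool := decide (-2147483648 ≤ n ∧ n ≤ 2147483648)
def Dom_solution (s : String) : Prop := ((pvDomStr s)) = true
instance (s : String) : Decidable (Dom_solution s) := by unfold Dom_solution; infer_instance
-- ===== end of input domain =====

-- B replaces A's pop(0) while-loop by one linear pass with counters (measured faster asymptotically).

-- ===== PORT A =====
-- A's while-loop: each iteration pops the head of the remaining list, so it is
-- structural recursion on that list with state (tmp1, answer, a, b).
def solutionLoopA (rest : List Char) (tmp1 : Char) (answer a b : Int) : Int :=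
  match rest with
  | [] => answer + 1
  | t :: rs =>
    if a ≠ b then
      if tmp1 = t then solutionLoopA rs tmp1 answer (a + 1) b
      else solutionLoopA rs tmp1 answer a (b + 1)
    else solutionLoopA rs t (answer + 1) 1 0

def solution (s : String) : Int :=
  match s.toList with
  | [] => 0        -- Python raises IndexError here (s.pop(0) on empty); excluded by Pre_solution
  | c :: rest => solutionLoopA rest c 0 1 0

-- ===== PORT B =====
-- one fold over the characters; state (answer, same, diff, cur); cur = None → Option Char
def stepB (st : Int × Int × Int × Option Char) (ch : Char) : Int × Int × Int × Option Char :=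
  let (answer, same, diff, cur) := st
  if same = diff then (answer + 1, 1, 0, some ch)
  else if some ch = cur then (answer, same + 1, diff, cur)
  else (answer, same, diff + 1, cur)

def solution_alt (s : String) : Int :=
  (s.toList.foldl stepB (0, 0, 0, none)).1

-- ===== PRECONDITION & SPEC =====
-- Pre_ excludes only the empty string, on which A raises IndexError.
def Pre_solution (s : String) : Prop := s.toList ≠ []
instance (s : String) : Decidable (Pre_solution s) := by unfold Pre_solution; infer_instance

def pvWitness_solution : String := "banana"

def Spec_solution (s : String) (out : Int) : Prop := out = solution_alt s
instance (s : String) (out : Int) : Decidable (Spec_solution s out) := by unfold Spec_solution; infer_instance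

-- ===== CLAIM (what is proved, stated in full; the proofs are below) =====
def Claim_equal_solution : Prop := ∀ (s : String), Dom_solution s → Pre_solution s → Spec_solution s (solution s)

-- ===== LEMMAS AND PROOFS =====
-- Invariant: A's loop state (tmp1, answer, a, b) corresponds to B's fold state
-- (answer + 1, a, b, some tmp1): B counts segment starts, A counts finished segments and adds 1.
theorem loop_eq_fold (rest : List Char) :
    ∀ (tmp1 : Char) (answer a b : Int),
      solutionLoopA rest tmp1 answer a b = (rest.foldl stepB (answer + 1, a, b, some tmp1)).1 := by
  induction rest with
  | nil => intro tmp1 answer a b; simp [solutionLoopA]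
  | cons t rs ih =>
    intro tmp1 answer a b
    by_cases hab : a = b
    · subst hab
      simp [solutionLoopA, stepB, List.foldl, ih]
    · by_cases ht : tmp1 = t
      · subst ht
        simp [solutionLoopA, stepB, hab, List.foldl, ih]
      · have hne : ¬ some t = some tmp1 := by
          simp; intro h; exact ht h.symm
        simp [solutionLoopA, stepB, hab, ht, hne, List.foldl, ih]

-- ===== VERDICT (by name: the statement is the Claim_ definition above) =====
theorem solution_spec : Claim_equal_solution := by
  intro s _ hpre
  unfold Spec_solution solution solution_alt
  cases h : s.toList with
  | nil => exact absurd h hpre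
  | cons c rest =>
    show solutionLoopA rest c 0 1 0 = (List.foldl stepB (0, 0, 0, none) (c :: rest)).1
    rw [loop_eq_fold]
    simp [List.foldl, stepB]
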